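-- pv_equiv track=rewrite | github.com/renovatorNO1/intro_to_python_hw3 | project2.py | find
-- ===== SOURCE A (Python) =====
-- def find(some_string, substring, start, end):
--     '''Find the first index of section that matches the substring'''
--     #Specify the range within which we are to search for substring
--     string_range = some_string[start:end+1]
--     for i in range(len(string_range)):
--         counter = 0
--         for x in range(len(substring)):
--             # Break the loop if (i + len(substring) -1) is out of index
--             if i+len(substring)-1 >= len(string_range):
--                 break
--
--             #Compare each character
--             elif substring[x] == string_range[i+x]:
--                 counter += 1
--                 if counter == len(substring):
--                     return i #Return the index if the substring is found
--
--             #Break out from the loop if the sequence doesn't match the substring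
--             else:
--                 break
--     return -1 #Return -1 if the iteration is finished
-- ===== SOURCE B (Python) =====
-- def find(some_string, substring, start, end):
--     '''Find the first index of section that matches the substring'''
--     # idiomatic: slice the search range and use the built-in str.find
--     return some_string[start:end + 1].find(substring)
-- ===== Notes on version B (the rewrite author's own statement) =====
-- stated objective: idiomatic
-- what changed: The hand-written nested character-comparison loop with a counter is replaced by a single call to the built-in str.find on the sliced range.
-- intended difference: For an empty substring A's inner loop never runs so A returns -1, while B returns 0 (the standard str.find convention: the empty string occurs at index 0), which is the intended value. — e.g. on find("ab", "", 0, 5): A returns -1, B returns 0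
import Mathlib
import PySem

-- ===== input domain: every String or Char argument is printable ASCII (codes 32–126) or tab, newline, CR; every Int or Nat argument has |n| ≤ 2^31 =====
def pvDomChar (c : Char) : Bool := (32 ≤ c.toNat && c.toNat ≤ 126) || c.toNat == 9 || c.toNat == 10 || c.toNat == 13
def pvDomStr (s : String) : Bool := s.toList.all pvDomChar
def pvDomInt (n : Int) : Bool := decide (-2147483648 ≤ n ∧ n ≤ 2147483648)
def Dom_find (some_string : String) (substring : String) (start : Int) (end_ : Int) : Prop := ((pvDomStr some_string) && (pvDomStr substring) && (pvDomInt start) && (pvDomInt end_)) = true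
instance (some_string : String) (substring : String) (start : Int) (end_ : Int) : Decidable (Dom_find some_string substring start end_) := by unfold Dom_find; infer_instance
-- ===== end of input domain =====

-- B replaces A's hand-written nested comparison loop by the built-in str.find on the
-- sliced range (idiomatic); on an empty substring A returns -1 while B returns 0 (intended).

-- ===== PORT A =====
-- inner 'for x in range(len(substring))' loop: state = counter; returns true iff the
-- Python loop hits 'return i' (indices accessed are always in range; pyGetD default unused)
def findInnerA (sub r : List Char) (i : Int) : List Int → Nat → Bool
  | [], _ => false
  | x :: xs, counter =>
    if (i + (sub.length : Int) - 1) ≥ (r.length : Int) then false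
    else if PySem.List.pyGetD sub x ' ' == PySem.List.pyGetD r (i + x) ' ' then
      (if counter + 1 = sub.length then true else findInnerA sub r i xs (counter + 1))
    else false

-- outer 'for i in range(len(string_range))' loop
def findOuterA (sub r : List Char) : List Int → Int
  | [] => -1
  | i :: is =>
    if findInnerA sub r i (PySem.List.pyRange 0 (sub.length : Int) 1) 0 then i
    else findOuterA sub r is

def find (some_string : String) (substring : String) (start : Int) (end_ : Int) : Int :=
  let string_range := PySem.List.slice some_string.toList (some start) (some (end_ + 1))
  findOuterA substring.toList string_range
    (PySem.List.pyRange 0 (string_range.length : Int) 1)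

-- ===== PORT B =====
def find_alt (some_string : String) (substring : String) (start : Int) (end_ : Int) : Int :=
  PySem.Chars.find (PySem.List.slice some_string.toList (some start) (some (end_ + 1)))
    substring.toList

-- ===== PRECONDITION & SPEC =====
-- On an empty substring A's inner loop body never executes so A returns -1; B returns 0,
-- the standard str.find convention (the empty string occurs at index 0), which is intended.
def D_find (some_string : String) (substring : String) (start : Int) (end_ : Int) : Prop := substring = ""
instance (some_string : String) (substring : String) (start : Int) (end_ : Int) : Decidable (D_find some_string substring start end_) := by unfold D_find; infer_instance

def Spec_find (some_string : String) (substring : String) (start : Int) (end_ : Int) (out : Int) : Prop := ¬ D_find some_string substring start end_ → out = find_alt some_string substring start end_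
instance (some_string : String) (substring : String) (start : Int) (end_ : Int) (out : Int) : Decidable (Spec_find some_string substring start end_ out) := by unfold Spec_find; infer_instance

def pvDiffWitness_find : String × String × Int × Int := ("ab", "", 0, 5)
def pvDiffWitnessOut_find : Int × Int := (-1, 0)

-- ===== CLAIM (what is proved, stated in full; the proofs are below) =====
def Claim_unchanged_find : Prop := ∀ (some_string : String) (substring : String) (start : Int) (end_ : Int), Dom_find some_string substring start end_ → Spec_find some_string substring start end_ (find some_string substring start end_)
def Claim_changed_find : Prop := Dom_find (pvDiffWitness_find.1) (pvDiffWitness_find.2.1) (pvDiffWitness_find.2.2.1) (pvDiffWitness_find.2.2.2) ∧ D_find (pvDiffWitness_find.1) (pvDiffWitness_find.2.1) (pvDiffWitness_find.2.2.1) (pvDiffWitness_find.2.2.2) ∧ find (pvDiffWitness_find.1) (pvDiffWitness_find.2.1) (pvDiffWitness_find.2.2.1) (pvDiffWitness_find.2.2.2) = pvDiffWitnessOut_find.1 ∧ find_alt (pvDiffWitness_find.1) (pvDiffWitness_find.2.1) (pvDiffWitness_find.2.2.1) (pvDiffWitness_find.2.2.2) = pvDiffWitnessOut_find.2 ∧ pvDiffWitnessOut_find.1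 ≠ pvDiffWitnessOut_find.2
def Claim_exact_find : Prop := ∀ (some_string : String) (substring : String) (start : Int) (end_ : Int), Dom_find some_string substring start end_ → D_find some_string substring start end_ → find some_string substring start end_ ≠ find_alt some_string substring start end_

-- ===== LEMMAS AND PROOFS =====

-- sub is a prefix of r.drop j iff the window fits and the characters match pointwise
theorem prefix_char_iff (sub r : List Char) (hm : 1 ≤ sub.length) (j : Nat) :
    sub <+: r.drop j ↔
      (j + sub.length ≤ r.length ∧
        ∀ x : Nat, x < sub.length → sub.getD x ' ' = r.getD (j + x) ' ') := by
  constructor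
  · intro h
    have hlen : sub.length ≤ (r.drop j).length := h.length_le
    simp only [List.length_drop] at hlen
    have hj : j + sub.length ≤ r.length := by omega
    refine ⟨hj, fun x hx => ?_⟩
    obtain ⟨t, ht⟩ := h
    rw [List.getD_eq_getElem?_getD, List.getD_eq_getElem?_getD,
      ← List.getElem?_drop, ← ht, List.getElem?_append_left hx]
  · rintro ⟨hj, hall⟩
    have htake : (r.drop j).take sub.length = sub := by
      apply List.ext_getElem
      · simp; omega
      · intro i h1 h2
        have hi : i < sub.length := h2
        have hir : j + i < r.length := by omega
        have := hall i hi
        rw [List.getD_eq_getElem sub ' ' hi, List.getD_eq_getElem r ' ' hir] at this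
        simp only [List.getElem_take, List.getElem_drop]
        exact this.symm
    rw [← htake]
    exact List.take_prefix _ _

-- the inner loop, started at counter k on range(k, m), decides "window fits and sub[k:] matches"
theorem findInnerA_go (sub r : List Char) (j : Nat) :
    ∀ n k : Nat, sub.length - k = n → k < sub.length →
    (findInnerA sub r (j : Int) (PySem.List.pyRange (k : Int) (sub.length : Int) 1) k = true
      ↔ (j + sub.length ≤ r.length ∧
          ∀ x : Nat, k ≤ x → x < sub.length → sub.getD x ' ' = r.getD (j + x) ' ')) := by
  intro n
  induction n with
  | zero => intro k h hk; omega
  | succ n ih =>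
    intro k h hk
    rw [PySem.List.pyRange_one_cons (by exact_mod_cast hk)]
    have hjk : ((j : Int) + (k : Int)) = ((j + k : Nat) : Int) := by push_cast; ring
    simp only [findInnerA]
    by_cases hg : ((j : Int) + (sub.length : Int) - 1) ≥ ((r.length : Int))
    · rw [if_pos hg]
      simp only [Bool.false_eq_true, false_iff, not_and]
      intro h1
      exfalso
      have : (j : Int) + (sub.length : Int) ≤ (r.length : Int) := by exact_mod_cast h1
      omega
    · rw [if_neg hg]
      have hfit : j + sub.length ≤ r.length := by
        have : (j : Int) + (sub.length : Int) - 1 < (r.length : Int) := by omega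
        omega
      have e1 : PySem.List.pyGetD sub ((k : Nat) : Int) ' ' = sub.getD k ' ' :=
        PySem.List.pyGetD_natCast sub k ' '
      have e2 : PySem.List.pyGetD r ((j : Int) + (k : Int)) ' ' = r.getD (j + k) ' ' := by
        rw [hjk]; exact PySem.List.pyGetD_natCast r (j + k) ' '
      by_cases hc : sub.getD k ' ' = r.getD (j + k) ' '
      · have hcond : (PySem.List.pyGetD sub ((k : Nat) : Int) ' '
            == PySem.List.pyGetD r ((j : Int) + (k : Int)) ' ') = true := by
          rw [e1, e2]; exact beq_iff_eq.mpr hc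
        rw [hcond]
        simp only [if_true]
        by_cases hlast : k + 1 = sub.length
        · rw [if_pos hlast]
          simp only [true_iff]
          refine ⟨hfit, fun x hx1 hx2 => ?_⟩
          have : x = k := by omega
          subst this
          exact hc
        · rw [if_neg hlast]
          have hk1 : k + 1 < sub.length := by omega
          have hcast : ((k : Int) + 1) = ((k + 1 : Nat) : Int) := by push_cast; ring
          rw [hcast, ih (k + 1) (by omega) hk1]
          constructor
          · rintro ⟨h1, h2⟩
            refine ⟨h1, fun x hx1 hx2 => ?_⟩
            rcases Nat.eq_or_lt_of_le hx1 with hx | hx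
            · subst hx; exact hc
            · exact h2 x (by omega) hx2
          · rintro ⟨h1, h2⟩
            exact ⟨h1, fun x hx1 hx2 => h2 x (by omega) hx2⟩
      · have hcond : (PySem.List.pyGetD sub ((k : Nat) : Int) ' '
            == PySem.List.pyGetD r ((j : Int) + (k : Int)) ' ') = false := by
          rw [e1, e2]; exact beq_eq_false_iff_ne.mpr hc
        rw [hcond]
        simp only [Bool.false_eq_true, if_false, false_iff, not_and]
        intro _ hall
        exact hc (hall k le_rfl hk)

-- the inner loop as actually called decides "sub is a prefix of r.drop j"
theorem findInnerA_iff (sub r : List Char) (hsub : sub ≠ []) (j : Nat) :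
    findInnerA sub r (j : Int) (PySem.List.pyRange 0 (sub.length : Int) 1) 0 = true
      ↔ sub <+: r.drop j := by
  have hm : 1 ≤ sub.length := List.length_pos_iff.mpr hsub
  have h0 : ((0 : Nat) : Int) = (0 : Int) := rfl
  rw [← h0, findInnerA_go sub r j (sub.length - 0) 0 rfl (by omega),
    prefix_char_iff sub r hm j]
  constructor
  · rintro ⟨h1, h2⟩; exact ⟨h1, fun x hx => h2 x (Nat.zero_le x) hx⟩
  · rintro ⟨h1, h2⟩; exact ⟨h1, fun x _ hx => h2 x hx⟩

theorem findOuterA_all_false (sub r : List Char) (l : List Int)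
    (h : ∀ i ∈ l, findInnerA sub r i (PySem.List.pyRange 0 (sub.length : Int) 1) 0 = false) :
    findOuterA sub r l = -1 := by
  induction l with
  | nil => rfl
  | cons i is ih =>
    simp only [findOuterA, h i (List.mem_cons_self), Bool.false_eq_true, if_false]
    exact ih (fun x hx => h x (List.mem_cons_of_mem _ hx))

theorem findOuterA_first (sub r : List Char) (k : Nat)
    (htrue : findInnerA sub r (k : Int) (PySem.List.pyRange 0 (sub.length : Int) 1) 0 = true)
    (hfalse : ∀ j : Nat, j < k →
      findInnerA sub r (j : Int) (PySem.List.pyRange 0 (sub.length : Int) 1) 0 = false) :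
    ∀ d a n : Nat, k - a = d → a ≤ k → k < n →
    findOuterA sub r (PySem.List.pyRange (a : Int) (n : Int) 1) = (k : Int) := by
  intro d
  induction d with
  | zero =>
    intro a n hd ha hn
    have : a = k := by omega
    subst this
    rw [PySem.List.pyRange_one_cons (by exact_mod_cast hn)]
    simp only [findOuterA, htrue, if_true]
  | succ d ih =>
    intro a n hd ha hn
    have han : a < k := by omega
    rw [PySem.List.pyRange_one_cons (by exact_mod_cast (by omega : a < n))]
    simp only [findOuterA, hfalse a han, Bool.false_eq_true, if_false]
    have hcast : ((a : Int) + 1) = ((a + 1 : Nat) : Int) := by push_cast; ring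
    rw [hcast]
    exact ih (a + 1) n (by omega) (by omega) hn

-- core equivalence on the sliced list
theorem outer_eq_find (sub r : List Char) (hsub : sub ≠ []) :
    findOuterA sub r (PySem.List.pyRange 0 (r.length : Int) 1) = PySem.Chars.find r sub := by
  have hm : 1 ≤ sub.length := List.length_pos_iff.mpr hsub
  by_cases hinf : sub <:+: r
  · have h0 : 0 ≤ PySem.Chars.find r sub := (PySem.Chars.find_nonneg_iff r sub).mpr hinf
    obtain ⟨hpre, hmin⟩ := PySem.Chars.find_spec (s := r) (sub := sub) h0
    set k := (PySem.Chars.find r sub).toNat with hkdef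
    have hwin := (prefix_char_iff sub r hm k).mp hpre
    have hkn : k < r.length := by omega
    have heq : findOuterA sub r (PySem.List.pyRange 0 ((r.length : Nat) : Int) 1) = (k : Int) := by
      refine findOuterA_first sub r k ((findInnerA_iff sub r hsub k).mpr hpre)
        (fun j hj => ?_) (k - 0) 0 r.length rfl (Nat.zero_le k) hkn
      rw [Bool.eq_false_iff]
      intro hc
      exact hmin j hj ((findInnerA_iff sub r hsub j).mp hc)
    rw [heq, hkdef, Int.toNat_of_nonneg h0]
  · have hfind : PySem.Chars.find r sub = -1 := (PySem.Chars.find_eq_neg_one_iff r sub).mpr hinf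
    rw [hfind]
    apply findOuterA_all_false
    intro i hi
    have hmem := (PySem.List.mem_pyRange_one).mp hi
    have hnn : 0 ≤ i := hmem.1
    rw [show i = ((i.toNat : Nat) : Int) from (Int.toNat_of_nonneg hnn).symm,
      Bool.eq_false_iff]
    intro hc
    have hpre := (findInnerA_iff sub r hsub i.toNat).mp hc
    have : PySem.Chars.isIn sub r = true :=
      (PySem.Chars.exists_prefix_drop_iff_isIn sub r).mp ⟨i.toNat, hpre⟩
    exact hinf ((PySem.Chars.isIn_iff_infix sub r).mp this)

-- ===== VERDICT (by name: the statement is the Claim_ definition above) =====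
theorem find_spec : Claim_unchanged_find := by
  intro s sub start end_ _ hD
  have hsub : sub.toList ≠ [] := by
    intro h
    exact hD (by simpa using h)
  exact outer_eq_find sub.toList (PySem.List.slice s.toList (some start) (some (end_ + 1))) hsub

theorem find_changed : Claim_changed_find := by unfold Claim_changed_find; decide

theorem find_tight : Claim_exact_find := by
  intro s sub start end_ _ hD
  have hsub : sub.toList = [] := by simp [show sub = "" from hD]
  have hA : find s sub start end_ = -1 := by
    unfold find
    apply findOuterA_all_false
    intro i _
    rw [hsub]
    simp [PySem.List.pyRange_one_eq_nil, findInnerA]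
  have hB : find_alt s sub start end_ = 0 := by
    unfold find_alt
    rw [hsub]
    exact PySem.Chars.find_nil _
  rw [hA, hB]
  decide
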